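-- pv_equiv track=rewrite | github.com/gauravbhatt2/AI_CRM | ai-crm-system/app/services/speaker_diarization.py | _build_ab_mapping
-- ===== SOURCE A (Python) =====
-- def _build_ab_mapping(raw_labels: list[str]) -> dict[str, str]:
--     """Map pyannote labels to Speaker A / Speaker B (first two unique speakers)."""
--     order: list[str] = []
--     seen: set[str] = set()
--     for lab in raw_labels:
--         if lab not in seen:
--             seen.add(lab)
--             order.append(lab)
--     mapping: dict[str, str] = {}
--     if len(order) >= 1:
--         mapping[order[0]] = "Speaker A"
--     if len(order) >= 2:
--         mapping[order[1]] = "Speaker B"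
--     for extra in order[2:]:
--         mapping[extra] = "Speaker B"
--     return mapping
-- ===== SOURCE B (Python) =====
-- def _build_ab_mapping(raw_labels: list[str]) -> dict[str, str]:
--     """Map pyannote labels to Speaker A / Speaker B (first two unique speakers)."""
--     mapping: dict[str, str] = {}
--     for lab in raw_labels:
--         if lab not in mapping:
--             mapping[lab] = "Speaker B" if mapping else "Speaker A"
--     return mapping
-- ===== Notes on version B (the rewrite author's own statement) =====
-- stated objective: simpler
-- what changed: Single first-sight pass that uses the result dict itself as the seen-tracker (first new label gets 'Speaker A', every later new label 'Speaker B'), replacing A's two-phase build of an order list + seen set followed by positional order[0]/order[1]/order[2:] assignment.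
import Mathlib
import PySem

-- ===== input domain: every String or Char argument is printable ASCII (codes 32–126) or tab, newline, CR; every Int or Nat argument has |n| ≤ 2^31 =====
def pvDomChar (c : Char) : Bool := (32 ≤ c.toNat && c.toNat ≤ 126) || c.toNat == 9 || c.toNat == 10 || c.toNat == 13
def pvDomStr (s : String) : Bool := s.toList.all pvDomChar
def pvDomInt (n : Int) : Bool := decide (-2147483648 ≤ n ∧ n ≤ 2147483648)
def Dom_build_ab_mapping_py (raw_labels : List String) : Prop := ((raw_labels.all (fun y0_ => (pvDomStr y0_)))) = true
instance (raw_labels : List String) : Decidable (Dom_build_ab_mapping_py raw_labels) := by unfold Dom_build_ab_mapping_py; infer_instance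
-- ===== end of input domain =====

-- B replaces A's two-phase order-list/seen-set build plus positional order[0]/order[1]/order[2:]
-- assignment by one first-sight pass that uses the result dict itself as the seen-tracker (simpler).

-- ===== PORT A =====
def build_ab_mapping_py (raw_labels : List String) : List (String × String) :=
  -- for lab in raw_labels: if lab not in seen: seen.add(lab); order.append(lab)
  let os := raw_labels.foldl
    (fun (st : List String × PySem.Set String) lab =>
      if PySem.Set.contains st.2 lab then st
      else (st.1 ++ [lab], PySem.Set.add st.2 lab))
    ([], PySem.Set.empty)
  let order := os.1
  let m0 : PySem.Dict String String := PySem.Dict.empty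
  -- if len(order) >= 1: mapping[order[0]] = "Speaker A"
  let m1 := if order.length ≥ 1 then m0.insert (PySem.List.pyGetD order (0 : Int) "") "Speaker A" else m0
  -- if len(order) >= 2: mapping[order[1]] = "Speaker B"
  let m2 := if order.length ≥ 2 then m1.insert (PySem.List.pyGetD order (1 : Int) "") "Speaker B" else m1
  -- for extra in order[2:]: mapping[extra] = "Speaker B"
  let m3 := (PySem.List.slice order (some 2) none).foldl
    (fun (m : PySem.Dict String String) extra => m.insert extra "Speaker B") m2
  m3.items

-- ===== PORT B =====
def build_ab_mapping_py_alt (raw_labels : List String) : List (String × String) :=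
  (raw_labels.foldl
    (fun (m : PySem.Dict String String) lab =>
      if m.contains lab then m
      else m.insert lab (if m.size = 0 then "Speaker A" else "Speaker B"))
    PySem.Dict.empty).items

-- ===== PRECONDITION & SPEC =====
def Spec_build_ab_mapping_py (raw_labels : List String) (out : List (String × String)) : Prop := out = build_ab_mapping_py_alt raw_labels
instance (raw_labels : List String) (out : List (String × String)) : Decidable (Spec_build_ab_mapping_py raw_labels out) := by unfold Spec_build_ab_mapping_py; infer_instance

-- ===== CLAIM (what is proved, stated in full; the proofs are below) =====
def Claim_equal_build_ab_mapping_py : Prop := ∀ (raw_labels : List String), Dom_build_ab_mapping_py raw_labels → Spec_build_ab_mapping_py raw_labels (build_ab_mapping_py raw_labels)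

-- ===== LEMMAS AND PROOFS =====

/-- The common result, as a function of the ordered dedup of the labels:
first unique label ↦ "Speaker A", every other unique label ↦ "Speaker B". -/
def abSpec : List String → List (String × String)
  | [] => []
  | a :: rest => (a, "Speaker A") :: rest.map (fun x => (x, "Speaker B"))

/-- A's first loop keeps `order = seen` (both start equal), and its state is `Set.update`. -/
lemma loopA_eq (raw : List String) : ∀ (s : PySem.Set String),
    raw.foldl
      (fun (st : List String × PySem.Set String) lab =>
        if PySem.Set.contains st.2 lab then st
        else (st.1 ++ [lab], PySem.Set.add st.2 lab)) (s, s)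
    = (PySem.Set.update s raw, PySem.Set.update s raw) := by
  induction raw with
  | nil => intro s; simp [PySem.Set.update_nil]
  | cons lab rest ih =>
    intro s
    rw [PySem.Set.update_cons]
    by_cases h : lab ∈ s
    · simpa [List.foldl_cons, h, PySem.Set.add_of_mem h] using ih s
    · simpa [List.foldl_cons, h, PySem.Set.add_of_not_mem h] using ih (PySem.Set.add s lab)

/-- A's tail loop over fresh, distinct keys appends its pairs in order. -/
lemma foldl_insertB (rest : List String) : ∀ (d : PySem.Dict String String),
    d.keys.Nodup → rest.Nodup → (∀ x ∈ rest, d.contains x = false) →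
    (rest.foldl (fun (m : PySem.Dict String String) e => m.insert e "Speaker B") d).items
      = d.items ++ rest.map (fun x => (x, "Speaker B")) := by
  induction rest with
  | nil => intro d _ _ _; simp
  | cons e rest ih =>
    intro d hk hn hf
    have he : d.contains e = false := hf e (by simp)
    rw [List.foldl_cons, ih (d.insert e "Speaker B")
        (PySem.Dict.nodup_keys_insert _ _ _ hk)
        (by exact hn.of_cons)
        (by
          intro x hx
          have hxe : x ≠ e := by
            rintro rfl; exact (List.nodup_cons.mp hn).1 hx
          rw [PySem.Dict.contains_insert]
          simp [hxe, hf x (List.mem_cons_of_mem _ hx)]),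
      PySem.Dict.items_insert_of_not_contains _ _ he]
    simp

/-- keys of the abSpec dict are the dedup list itself. -/
lemma map_fst_abSpec (l : List String) : (abSpec l).map Prod.fst = l := by
  cases l with
  | nil => rfl
  | cons a rest => simp [abSpec, Function.comp_def]

/-- B's single pass computes abSpec of the ordered dedup. -/
lemma alt_eq_abSpec (raw : List String) :
    build_ab_mapping_py_alt raw = abSpec (PySem.Set.ofList raw) := by
  unfold build_ab_mapping_py_alt
  induction raw using List.reverseRecOn with
  | nil => rfl
  | append_singleton xs x ih =>
    rw [List.foldl_append, List.foldl_cons, List.foldl_nil, PySem.Set.ofList_append_singleton]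
    set d := xs.foldl
      (fun (m : PySem.Dict String String) lab =>
        if m.contains lab then m
        else m.insert lab (if m.size = 0 then "Speaker A" else "Speaker B"))
      PySem.Dict.empty with hd
    have hkeys : d.keys = PySem.Set.ofList xs := by
      show d.items.map Prod.fst = _
      rw [ih, map_fst_abSpec]
    by_cases h : x ∈ PySem.Set.ofList xs
    · have hc : d.contains x = true :=
        (PySem.Dict.contains_iff_mem_keys d x).2 (by rw [hkeys]; exact h)
      rw [if_pos hc, PySem.Set.add_of_mem h, ih]
    · have hc : d.contains x = false := by
        by_contra hne
        exact h (by rw [← hkeys]; exact (PySem.Dict.contains_iff_mem_keys d x).1 (by simpa using hne))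
      rw [if_neg (by simp [hc]), PySem.Dict.items_insert_of_not_contains d _ hc,
        PySem.Set.add_of_not_mem h, ih]
      have hsize : d.size = (abSpec (PySem.Set.ofList xs)).length := by
        show d.items.length = _; rw [ih]
      cases hl : PySem.Set.ofList xs with
      | nil => rw [hl] at hsize; simp [abSpec] at hsize ⊢; simp [hsize]
      | cons a rest =>
        have hnz : d.size ≠ 0 := by rw [hsize, hl]; simp [abSpec]
        simp [hnz, abSpec]

/-- A's second phase (the two guarded inserts plus the order[2:] loop) on a
duplicate-free order list also yields abSpec. -/
lemma phase2_eq (l : List String) (hnd : l.Nodup) :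
    ((PySem.List.slice l (some 2) none).foldl
        (fun (m : PySem.Dict String String) extra => m.insert extra "Speaker B")
        (if l.length ≥ 2
          then (if l.length ≥ 1
            then (PySem.Dict.empty : PySem.Dict String String).insert (PySem.List.pyGetD l (0:Int) "") "Speaker A"
            else PySem.Dict.empty).insert (PySem.List.pyGetD l (1:Int) "") "Speaker B"
          else (if l.length ≥ 1
            then (PySem.Dict.empty : PySem.Dict String String).insert (PySem.List.pyGetD l (0:Int) "") "Speaker A"
            else PySem.Dict.empty))).items
      = abSpec l := by
  match l, hnd with
  | [], _ => rfl
  | [a], _ => rfl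
  | a :: b :: rest, hnd =>
    have h0 : PySem.List.pyGetD (a :: b :: rest) (0:Int) "" = a := by
      simp [PySem.List.pyGetD_ofNat' (a :: b :: rest) 0 ""]
    have h1 : PySem.List.pyGetD (a :: b :: rest) (1:Int) "" = b := by
      simpa using PySem.List.pyGetD_ofNat' (a :: b :: rest) 1 ""
    have hsl : PySem.List.slice (a :: b :: rest) (some 2) none = rest := by
      rw [PySem.List.slice_from _ (by norm_num : (0:Int) ≤ 2)]
      rfl
    rw [if_pos (by simp), if_pos (by simp), h0, h1, hsl]
    have hane : a ≠ b := by simp at hnd; tauto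
    have hcb : ((PySem.Dict.empty : PySem.Dict String String).insert a "Speaker A").contains b = false := by
      rw [PySem.Dict.contains_insert]
      simp [hane.symm]
    rw [foldl_insertB rest _
      (PySem.Dict.nodup_keys_insert _ _ _
        (PySem.Dict.nodup_keys_insert _ _ _ PySem.Dict.nodup_keys_empty))
      (by simp at hnd; exact hnd.2.2)
      (by
        intro x hx
        have hxa : x ≠ a := by rintro rfl; simp at hnd; tauto
        have hxb : x ≠ b := by rintro rfl; simp at hnd; tauto
        rw [PySem.Dict.contains_insert, PySem.Dict.contains_insert]
        simp [hxa, hxb]),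
      PySem.Dict.items_insert_of_not_contains _ _ hcb,
      PySem.Dict.items_insert_of_not_contains _ _ (by simp)]
    simp [abSpec]
    rfl

/-- A's two-phase construction also computes abSpec of the ordered dedup. -/
lemma a_eq_abSpec (raw : List String) :
    build_ab_mapping_py raw = abSpec (PySem.Set.ofList raw) := by
  unfold build_ab_mapping_py
  rw [show (PySem.Set.empty : PySem.Set String) = ([] : List String) from rfl,
    loopA_eq raw [], PySem.Set.update_nil_left]
  exact phase2_eq (PySem.Set.ofList raw) (PySem.Set.nodup_ofList raw)

-- ===== VERDICT (by name: the statement is the Claim_ definition above) =====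
theorem build_ab_mapping_py_spec : Claim_equal_build_ab_mapping_py := by
  intro raw _
  unfold Spec_build_ab_mapping_py
  rw [a_eq_abSpec, alt_eq_abSpec]
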